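-- pv_equiv track=rewrite | github.com/mr-mateusz/sudoku-solver | src/functions.py | find_pair_subset
-- ===== SOURCE A (Python) =====
-- from collections.abc import Iterable, Sequence
--
-- def find_pair_subset(seq: Sequence[set]) -> list[tuple[tuple[int, int], int, int]]:
--     """
--     In the sequence:
--     1. Find all positions that have 2 possible values
--     2. From found positions (and possible values) take the ones that fulfill the following requirement:
--         - both of the numbers from this position occur in one different position (but this position
--           can contain different possible values as well)
--         - none of the numbers occur in any different position
--     Args:
--         seq:
--
--     Returns:
--         List of found pair subsets in the following form:
--         [((number1, number2), pair position, position with pair as subset), ...]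
--     """
--     possible_vals_2_elem = [(index, s) for index, s in enumerate(seq) if len(s) == 2]
--
--     result = []
--     for index, pair in possible_vals_2_elem:
--         num1, num2 = sorted(pair)
--         num1_in = []
--         num2_in = []
--         for other_index, other in enumerate(seq):
--             if index == other_index:
--                 continue
--             if num1 in other:
--                 num1_in.append(other_index)
--             if num2 in other:
--                 num2_in.append(other_index)
--
--         if len(num1_in) == 1 and len(num2_in) == 1 and num1_in[0] == num2_in[0]:
--             result.append(((num1, num2), index, num1_in[0]))
--     return result
-- ===== SOURCE B (Python) =====
-- def find_pair_subset(seq):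
--     # Build once: value -> ascending list of positions containing it (replaces A's inner scan per pair-cell).
--     positions = {}
--     for i, s in enumerate(seq):
--         for v in s:
--             positions.setdefault(v, []).append(i)
--     result = []
--     for i, s in enumerate(seq):
--         if len(s) == 2:
--             a, b = sorted(s)
--             pa = [j for j in positions[a] if j != i]
--             pb = [j for j in positions[b] if j != i]
--             if len(pa) == 1 and pa == pb:
--                 result.append(((a, b), i, pa[0]))
--     return result
-- ===== Notes on version B (the rewrite author's own statement) =====
-- stated objective: alternative
-- what changed: B builds a value->positions index in one pass and answers each 2-value cell by two list lookups, removing A's inner scan over all cells per candidate cell.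
import Mathlib
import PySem

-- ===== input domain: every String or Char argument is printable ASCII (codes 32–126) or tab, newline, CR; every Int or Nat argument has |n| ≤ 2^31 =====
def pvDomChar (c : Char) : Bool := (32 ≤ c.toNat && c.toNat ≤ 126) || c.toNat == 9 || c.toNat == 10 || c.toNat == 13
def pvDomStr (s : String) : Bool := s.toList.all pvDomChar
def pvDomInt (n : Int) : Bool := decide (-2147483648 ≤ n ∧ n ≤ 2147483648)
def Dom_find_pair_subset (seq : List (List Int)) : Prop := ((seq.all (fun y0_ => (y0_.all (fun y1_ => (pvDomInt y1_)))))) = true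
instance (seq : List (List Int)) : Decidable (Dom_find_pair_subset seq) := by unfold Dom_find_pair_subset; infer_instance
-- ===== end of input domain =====

-- B replaces A's per-candidate scan over all cells by a value→positions index built once (alternative algorithm, same results).
-- Inner lists model Python sets: their DISTINCT elements (PySem.List.dedup is applied where the set's size/order matters).

-- ===== PORT A =====
-- inner 'for other_index, other in enumerate(seq)' loop of A, accumulating (num1_in, num2_in)
def fpsInner (seq : List (List Int)) (index num1 num2 : Int) : List Int × List Int :=
  (PySem.List.enumerate seq).foldl (fun acc q =>
    if index = q.1 then acc
    else ((if num1 ∈ q.2 then acc.1 ++ [q.1] else acc.1),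
          (if num2 ∈ q.2 then acc.2 ++ [q.1] else acc.2))) ([], [])

def find_pair_subset (seq : List (List Int)) : List ((Int × Int) × Int × Int) :=
  let possible_vals_2_elem :=
    (PySem.List.enumerate seq).filter (fun p => (PySem.List.dedup p.2).length == 2)
  possible_vals_2_elem.foldl (fun result p =>
    match PySem.List.sorted (PySem.List.dedup p.2) (fun x => x) false with
    | [num1, num2] =>
      let inr := fpsInner seq p.1 num1 num2
      if inr.1.length = 1 ∧ inr.2.length = 1 ∧ inr.1.headD 0 = inr.2.headD 0
      then result ++ [((num1, num2), p.1, inr.1.headD 0)]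
      else result
    | _ => result) []   -- unreachable: sorted set of size 2 has exactly two elements

-- ===== PORT B =====
-- one pass: value -> ascending list of positions containing it (positions.setdefault(v, []).append(i))
def fpsPositions (seq : List (List Int)) : PySem.Dict Int (List Int) :=
  (PySem.List.enumerate seq).foldl (fun d p =>
    (PySem.List.dedup p.2).foldl (fun d v => d.insert v (d.getD v [] ++ [p.1])) d) PySem.Dict.empty

def find_pair_subset_alt (seq : List (List Int)) : List ((Int × Int) × Int × Int) :=
  let positions := fpsPositions seq
  (PySem.List.enumerate seq).foldl (fun result p =>
    if (PySem.List.dedup p.2).length = 2 then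
      match PySem.List.sorted (PySem.List.dedup p.2) (fun x => x) false with
      | [] => result
      | [_] => result
      | a :: b :: _ =>
        let pa := (positions.getD a []).filter (fun j => j != p.1)
        let pb := (positions.getD b []).filter (fun j => j != p.1)
        if pa.length = 1 ∧ pa = pb then result ++ [((a, b), p.1, pa.headD 0)]
        else result
    else result) []

-- ===== PRECONDITION & SPEC =====
def Spec_find_pair_subset (seq : List (List Int)) (out : List ((Int × Int) × Int × Int)) : Prop := out = find_pair_subset_alt seq
instance (seq : List (List Int)) (out : List ((Int × Int) × Int × Int)) : Decidable (Spec_find_pair_subset seq out) := by unfold Spec_find_pair_subset; infer_instance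

-- ===== CLAIM (what is proved, stated in full; the proofs are below) =====
def Claim_equal_find_pair_subset : Prop := ∀ (seq : List (List Int)), Dom_find_pair_subset seq → Spec_find_pair_subset seq (find_pair_subset seq)

-- ===== LEMMAS AND PROOFS =====

-- positions of v in an enumerated cell list
def occL (l : List (Int × List Int)) (v : Int) : List Int :=
  l.filterMap (fun q => if v ∈ q.2 then some q.1 else none)

theorem occL_cons (q : Int × List Int) (t : List (Int × List Int)) (v : Int) :
    occL (q :: t) v = (if v ∈ q.2 then [q.1] else []) ++ occL t v := by
  simp only [occL, List.filterMap_cons]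
  by_cases h : v ∈ q.2 <;> simp [h]

-- one cell's contribution to the dict
theorem fps_dict_cell (s : List Int) (hnd : s.Nodup) (d : PySem.Dict Int (List Int)) (i v : Int) :
    ((s.foldl (fun d w => d.insert w (d.getD w [] ++ [i])) d).getD v []) =
      d.getD v [] ++ (if v ∈ s then [i] else []) := by
  induction s generalizing d with
  | nil => simp
  | cons w t ih =>
    have hw : w ∉ t := (List.nodup_cons.mp hnd).1
    have hnd' : t.Nodup := (List.nodup_cons.mp hnd).2
    simp only [List.foldl_cons]
    rw [ih hnd']
    rw [PySem.Dict.getD_insert]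
    by_cases hv : v = w
    · subst hv
      have : v ∉ t := by simpa using hw
      simp [this]
    · simp [hv]

-- the whole index: getD v [] = list of positions whose (dedup'd) cell contains v
theorem fps_dict_spec (l : List (Int × List Int)) (d : PySem.Dict Int (List Int)) (v : Int) :
    ((l.foldl (fun d p => (PySem.List.dedup p.2).foldl (fun d w => d.insert w (d.getD w [] ++ [p.1])) d) d).getD v []) =
      d.getD v [] ++ occL (l.map (fun p => (p.1, PySem.List.dedup p.2))) v := by
  induction l generalizing d with
  | nil => simp [occL]
  | cons q t ih =>
    simp only [List.foldl_cons, List.map_cons]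
    rw [ih, occL_cons]
    rw [fps_dict_cell _ (PySem.List.nodup_dedup q.2)]
    simp [List.append_assoc]

-- A's inner loop computes the occurrence lists with index removed
theorem fpsInner_spec (l : List (Int × List Int)) (idx n1 n2 : Int) (a1 a2 : List Int) :
    (l.foldl (fun acc q =>
      if idx = q.1 then acc
      else ((if n1 ∈ q.2 then acc.1 ++ [q.1] else acc.1),
            (if n2 ∈ q.2 then acc.2 ++ [q.1] else acc.2))) (a1, a2)) =
      (a1 ++ (occL l n1).filter (fun j => j != idx),
       a2 ++ (occL l n2).filter (fun j => j != idx)) := by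
  induction l generalizing a1 a2 with
  | nil => simp [occL]
  | cons q t ih =>
    simp only [List.foldl_cons]
    by_cases h : idx = q.1
    · rw [if_pos h, ih, occL_cons, occL_cons]
      subst h
      by_cases m1 : n1 ∈ q.2 <;> by_cases m2 : n2 ∈ q.2 <;>
        simp [m1, m2]
    · rw [if_neg h, ih, occL_cons, occL_cons]
      have hj : (q.1 != idx) = true := by simp [Ne.symm h]
      by_cases m1 : n1 ∈ q.2 <;> by_cases m2 : n2 ∈ q.2 <;>
        simp [m1, m2, hj, List.append_assoc]

-- occL is insensitive to dedup of the cells (membership only)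
theorem occL_map_dedup (l : List (Int × List Int)) (v : Int) :
    occL (l.map (fun p => (p.1, PySem.List.dedup p.2))) v = occL l v := by
  induction l with
  | nil => rfl
  | cons q t ih =>
    simp only [List.map_cons, occL_cons, ih, PySem.List.mem_dedup]

-- the per-candidate conditions coincide
theorem cond_equiv (pa pb : List Int) :
    (pa.length = 1 ∧ pb.length = 1 ∧ pa.headD 0 = pb.headD 0) ↔ (pa.length = 1 ∧ pa = pb) := by
  match pa, pb with
  | [x], [y] => simp
  | [], _ => simp
  | (x :: y :: t), _ => simp
  | [x], [] => simp
  | [x], (y :: z :: t) => simp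

theorem find_pair_subset_eq (seq : List (List Int)) :
    find_pair_subset seq = find_pair_subset_alt seq := by
  unfold find_pair_subset find_pair_subset_alt
  rw [← PySem.List.foldl_if_eq_foldl_filter]
  apply PySem.List.foldl_congr_mem
  intro result p _
  have hpos : ∀ v : Int, ((fpsPositions seq).getD v []) = occL (PySem.List.enumerate seq) v := by
    intro v
    unfold fpsPositions
    rw [fps_dict_spec, occL_map_dedup]
    simp
  simp only [beq_iff_eq]
  by_cases hl : (PySem.List.dedup p.2).length = 2
  · rw [if_pos hl, if_pos hl]
    have hlen : (PySem.List.sorted (PySem.List.dedup p.2) (fun x => x) false).length = 2 := by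
      rw [PySem.List.length_sorted]; exact hl
    obtain ⟨a, b, hs⟩ := List.length_eq_two.mp hlen
    have hinner : fpsInner seq p.1 a b =
        ((occL (PySem.List.enumerate seq) a).filter (fun j => j != p.1),
         (occL (PySem.List.enumerate seq) b).filter (fun j => j != p.1)) := by
      unfold fpsInner
      rw [fpsInner_spec]
      simp
    rw [hs]
    dsimp only
    rw [hinner, hpos a, hpos b]
    exact if_congr (cond_equiv _ _) rfl rfl
  · rw [if_neg hl, if_neg hl]

-- ===== VERDICT (by name: the statement is the Claim_ definition above) =====
theorem find_pair_subset_spec : Claim_equal_find_pair_subset := by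
  intro seq _
  unfold Spec_find_pair_subset
  exact find_pair_subset_eq seq
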